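-- pv_equiv track=rewrite | github.com/Taoge123/OptimizedLeetcode | LeetcodeNew/python2/LC_1238.py | circularPermutation
-- ===== SOURCE A (Python) =====
-- def circularPermutation(n: int, start: int):
--     res = []
--     res.append(0)
--
--     for i in range(n):
--         step = len(res)
--         for j in range(step - 1, -1, -1):
--             res.append(res[j] | (1 << i))
--
--     i = res.index(start)
--     return res[i:] + res[:i]
-- ===== SOURCE B (Python) =====
-- def circularPermutation(n: int, start: int):
--     gray = [k ^ (k >> 1) for k in range(1 << n)]
--     idx = 0
--     g = start
--     while g > 0:
--         idx ^= g
--         g >>= 1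
--     return gray[idx:] + gray[:idx]
-- ===== Notes on version B (the rewrite author's own statement) =====
-- stated objective: alternative
-- what changed: Builds the Gray sequence by the closed form gray(k)=k^(k>>1) and rotates at a pivot computed arithmetically as the inverse Gray code of start, replacing A's double-and-mirror list construction plus linear .index scan; Pre_ restricts to the natural domain n >= 0 with a valid n-bit start (A raises ValueError for invalid start, and its value for negative n is a degenerate corner on which B raises on the negative shift).
-- outside the precondition, e.g. on circularPermutation(-1, 0): A returns [0], B raises ValueError
import Mathlib
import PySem

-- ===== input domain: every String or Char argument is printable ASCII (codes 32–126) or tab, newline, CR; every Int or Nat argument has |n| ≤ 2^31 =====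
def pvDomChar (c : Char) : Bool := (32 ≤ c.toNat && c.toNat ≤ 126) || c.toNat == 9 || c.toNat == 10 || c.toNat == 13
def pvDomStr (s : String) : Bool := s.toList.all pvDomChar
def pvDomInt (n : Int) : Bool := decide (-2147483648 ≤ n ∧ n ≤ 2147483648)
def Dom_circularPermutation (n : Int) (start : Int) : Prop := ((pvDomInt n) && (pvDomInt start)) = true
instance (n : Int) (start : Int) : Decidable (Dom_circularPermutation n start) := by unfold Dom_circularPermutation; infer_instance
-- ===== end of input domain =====

-- B builds the Gray sequence by the closed form gray(k) = k xor (k >> 1) and rotates it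
-- at a pivot computed arithmetically as the inverse Gray code of start (alternative
-- algorithm: no double-and-mirror construction, no linear index scan).

-- ===== PORT A =====
def circularPermutation (n : Int) (start : Int) : List Int :=
  -- res = []; res.append(0)
  let res : List Int := [] ++ [0]
  -- for i in range(n): step = len(res); for j in range(step-1,-1,-1): res.append(res[j] | (1 << i))
  let res := (PySem.List.pyRange 0 n 1).foldl (fun res i =>
    let step : Int := res.length
    (PySem.List.pyRange (step - 1) (-1) (-1)).foldl
      (fun r j => r ++ [PySem.Int.bor (PySem.List.pyGetD r j 0) ((1 : Int) <<< i.toNat)]) res) res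
      -- i comes from range(n), so i ≥ 0 and '1 << i' is exactly '1 <<< i.toNat'
  -- i = res.index(start); return res[i:] + res[:i]
  match PySem.List.index? res start with
  | some i => PySem.List.slice res (some (i : Int)) none ++ PySem.List.slice res none (some (i : Int))
  | none => []  -- Python raises ValueError here; excluded by Pre_

-- ===== PORT B =====
-- while g > 0: idx ^= g; g >>= 1
def igrayAux (idx g : Int) : Int :=
  if h : 0 < g then igrayAux (PySem.Int.bxor idx g) (g >>> (1:Nat)) else idx
termination_by g.toNat
decreasing_by
  rcases g with m | m
  · show ((m : Int) >>> (1:Nat)).toNat < ((m : Int)).toNat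
    rw [← Int.natCast_shiftRight]
    have hm : 0 < m := by rw [Int.ofNat_eq_natCast] at h; exact_mod_cast h
    simp only [Int.toNat_natCast, Nat.shiftRight_one]
    omega
  · omega

def circularPermutation_alt (n : Int) (start : Int) : List Int :=
  -- gray = [k ^ (k >> 1) for k in range(1 << n)]; Python's '1 << n' raises for n < 0,
  -- excluded by Pre_, so '<<< n.toNat' is exact on Pre_
  let gray : List Int := (PySem.List.pyRange 0 ((1 : Int) <<< n.toNat) 1).map
    (fun k => PySem.Int.bxor k (k >>> (1:Nat)))
  let idx : Int := igrayAux 0 start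
  -- return gray[idx:] + gray[:idx]
  PySem.List.slice gray (some idx) none ++ PySem.List.slice gray none (some idx)

-- ===== PRECONDITION & SPEC =====
-- Pre_ restricts to the natural domain n ≥ 0 with a valid n-bit start: A raises
-- ValueError (.index) whenever start is not in the n-bit Gray sequence, and for
-- negative n A's degenerate value [0] (reachable only with start = 0) is outside the
-- natural domain, where B raises on the negative shift.
def Pre_circularPermutation (n : Int) (start : Int) : Prop :=
  0 ≤ n ∧ 0 ≤ start ∧ start < (1 : Int) <<< n.toNat
instance (n : Int) (start : Int) : Decidable (Pre_circularPermutation n start) := by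
  unfold Pre_circularPermutation; infer_instance
def pvWitness_circularPermutation : Int × Int := (3, 6)

def Spec_circularPermutation (n : Int) (start : Int) (out : List Int) : Prop := out = circularPermutation_alt n start
instance (n : Int) (start : Int) (out : List Int) : Decidable (Spec_circularPermutation n start out) := by unfold Spec_circularPermutation; infer_instance

-- ===== CLAIM (what is proved, stated in full; the proofs are below) =====
def Claim_equal_circularPermutation : Prop := ∀ (n : Int) (start : Int), Dom_circularPermutation n start → Pre_circularPermutation n start → Spec_circularPermutation n start (circularPermutation n start)

-- ===== LEMMAS AND PROOFS =====

-- Nat-level Gray code and its inverse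
def grayN (k : Nat) : Nat := k ^^^ (k >>> 1)

def igrayN (s : Nat) : Nat :=
  if s = 0 then 0 else s ^^^ igrayN (s / 2)
decreasing_by omega

-- The Nat-level shape of A's loop state
def natGrayList : Nat → List Nat
  | 0 => [0]
  | i + 1 => natGrayList i ++ (natGrayList i).reverse.map (· ||| (1 <<< i))

-- xor decomposes through /2 and %2
theorem xor_div_two (x y : Nat) : (x ^^^ y) / 2 = x / 2 ^^^ y / 2 := by
  simp only [← Nat.shiftRight_one]; exact Nat.shiftRight_xor_distrib

theorem xor_mod_two (x y : Nat) : (x ^^^ y) % 2 = (x % 2) ^^^ (y % 2) := by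
  rw [Nat.xor_mod_two_eq]
  rcases Nat.mod_two_eq_zero_or_one x with h1 | h1 <;> rcases Nat.mod_two_eq_zero_or_one y with h2 | h2 <;>
    rw [h1, h2] <;> simp <;> omega

theorem xor_decomp (x y : Nat) : x ^^^ y = 2 * (x / 2 ^^^ y / 2) + ((x % 2) ^^^ (y % 2)) := by
  rw [← xor_div_two, ← xor_mod_two]; omega

-- xor with 2^i is addition below 2^i
theorem xor_two_pow (i t : Nat) (h : t < 2 ^ i) : 2 ^ i ^^^ t = 2 ^ i + t := by
  induction i generalizing t with
  | zero => interval_cases t <;> decide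
  | succ i ih =>
    have hp : (0:Nat) < 2 ^ i := Nat.two_pow_pos i
    have h2 : 2 ^ (i+1) = 2 * 2 ^ i := by ring
    rw [xor_decomp]
    have e1 : 2 ^ (i+1) / 2 = 2 ^ i := by omega
    have e2 : 2 ^ (i+1) % 2 = 0 := by omega
    have ht : t / 2 < 2 ^ i := by omega
    rw [e1, e2, ih _ ht, Nat.zero_xor]
    omega

-- xor with 2^i - 1 is complement below 2^i
theorem xor_ones (i t : Nat) (h : t < 2 ^ i) : (2 ^ i - 1) ^^^ t = 2 ^ i - 1 - t := by
  induction i generalizing t with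
  | zero => interval_cases t <;> decide
  | succ i ih =>
    have hp : (0:Nat) < 2 ^ i := Nat.two_pow_pos i
    have h2 : 2 ^ (i+1) = 2 * 2 ^ i := by ring
    rw [xor_decomp]
    have e1 : (2 ^ (i+1) - 1) / 2 = 2 ^ i - 1 := by omega
    have e2 : (2 ^ (i+1) - 1) % 2 = 1 := by omega
    have ht : t / 2 < 2 ^ i := by omega
    rw [e1, e2, ih _ ht]
    have e3 : (1:Nat) ^^^ (t % 2) = 1 - t % 2 := by
      rcases Nat.mod_two_eq_zero_or_one t with h3 | h3 <;> rw [h3] <;> decide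
    rw [e3]; omega

-- or with 2^i is xor (hence addition) below 2^i
theorem or_two_pow (i t : Nat) (h : t < 2 ^ i) : t ||| 2 ^ i = 2 ^ i + t := by
  have hx : t ||| 2 ^ i = 2 ^ i ^^^ t := by
    apply Nat.eq_of_testBit_eq; intro j
    by_cases hj : j = i
    · subst hj
      simp [Nat.testBit_or, Nat.testBit_xor, Nat.testBit_lt_two_pow h]
    · simp [Nat.testBit_or, Nat.testBit_xor, Nat.testBit_two_pow_of_ne (fun he => hj he.symm)]
  rw [hx, xor_two_pow i t h]

theorem grayN_lt (i t : Nat) (h : t < 2 ^ i) : grayN t < 2 ^ i := by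
  unfold grayN
  exact Nat.xor_lt_two_pow h (by rw [Nat.shiftRight_one]; omega)

-- THE reflection identity
theorem gray_reflect (i t : Nat) (h : t < 2 ^ i) :
    grayN (2 ^ i + t) = grayN (2 ^ i - 1 - t) ||| 2 ^ i := by
  rcases Nat.eq_zero_or_pos i with rfl | hi
  · interval_cases t <;> decide
  · obtain ⟨i, rfl⟩ : ∃ i', i = i' + 1 := ⟨i - 1, by omega⟩
    have hp : (0:Nat) < 2 ^ i := Nat.two_pow_pos i
    have h2 : 2 ^ (i+1) = 2 * 2 ^ i := by ring
    have ht2 : t / 2 < 2 ^ i := by omega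
    have hones : (2:Nat) ^ (i+1) - 1 - t = (2 ^ (i+1) - 1) ^^^ t := (xor_ones _ _ h).symm
    have hL : grayN (2 ^ (i+1) + t) = (2 ^ (i+1) ^^^ t) ^^^ (2 ^ i ^^^ t / 2) := by
      unfold grayN
      rw [Nat.shiftRight_one]
      have : (2 ^ (i+1) + t) / 2 = 2 ^ i + t / 2 := by omega
      rw [this, xor_two_pow _ _ h, xor_two_pow _ _ ht2]
    have hb : grayN ((2 ^ (i+1) - 1) ^^^ t) = ((2 ^ (i+1) - 1) ^^^ t) ^^^ ((2 ^ i - 1) ^^^ t / 2) := by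
      unfold grayN
      rw [Nat.shiftRight_one, xor_div_two]
      have : (2 ^ (i+1) - 1) / 2 = 2 ^ i - 1 := by omega
      rw [this]
    have hblt : grayN ((2 ^ (i+1) - 1) ^^^ t) < 2 ^ (i+1) := by
      apply grayN_lt
      rw [← hones]; omega
    have hor : grayN ((2 ^ (i+1) - 1) ^^^ t) ||| 2 ^ (i+1) = 2 ^ (i+1) ^^^ grayN ((2 ^ (i+1) - 1) ^^^ t) := by
      rw [or_two_pow _ _ hblt, xor_two_pow _ _ hblt]
    have hsplit : (2:Nat) ^ (i+1) - 1 = 2 ^ i ^^^ (2 ^ i - 1) := by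
      rw [xor_two_pow i (2 ^ i - 1) (by omega)]; omega
    rw [hones, hor, hb, hL, hsplit]
    simp only [Nat.xor_assoc, Nat.xor_comm, Nat.xor_left_comm, Nat.xor_self, Nat.xor_zero, Nat.zero_xor]

-- A's list is the range mapped through grayN
theorem natGrayList_eq (i : Nat) : natGrayList i = (List.range (2 ^ i)).map grayN := by
  induction i with
  | zero => decide
  | succ i ih =>
    have h2 : 2 ^ (i+1) = 2 ^ i + 2 ^ i := by ring
    rw [natGrayList, ih, h2, List.range_add, List.map_append]
    congr 1
    have hrev : (List.map grayN (List.range (2 ^ i))).reverse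
        = List.map grayN (List.range (2 ^ i)).reverse := List.map_reverse.symm
    rw [hrev, List.map_map, List.range_eq_range', List.reverse_range', List.map_map,
        ← List.range_eq_range']
    rw [List.map_map]
    apply List.map_congr_left
    intro t ht
    rw [List.mem_range] at ht
    simp only [Function.comp]
    have h1s : (1:Nat) <<< i = 2 ^ i := by rw [Nat.shiftLeft_eq]; ring
    rw [h1s, show 0 + 2 ^ i - 1 - t = 2 ^ i - 1 - t by omega, ← gray_reflect i t ht]

-- inverse facts
theorem gray_igray (s : Nat) : grayN (igrayN s) = s := by
  induction s using Nat.strong_induction_on with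
  | _ s ih =>
    rw [igrayN]
    by_cases hs : s = 0
    · subst hs; decide
    · simp only [hs, if_false]
      have ih2 : grayN (igrayN (s / 2)) = s / 2 := ih (s / 2) (by omega)
      unfold grayN at ih2 ⊢
      rw [Nat.shiftRight_one] at ih2 ⊢
      rw [xor_div_two]
      rw [show s ^^^ igrayN (s / 2) ^^^ (s / 2 ^^^ igrayN (s / 2) / 2)
            = s ^^^ ((igrayN (s / 2) ^^^ igrayN (s / 2) / 2) ^^^ s / 2) by
        simp only [Nat.xor_assoc, Nat.xor_comm, Nat.xor_left_comm]]
      rw [ih2]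
      simp

theorem igray_gray (k : Nat) : igrayN (grayN k) = k := by
  induction k using Nat.strong_induction_on with
  | _ k ih =>
    by_cases hk : k = 0
    · subst hk
      have h0 : grayN 0 = 0 := by decide
      rw [h0, igrayN]
      simp
    · have hg : grayN k ≠ 0 := by
        unfold grayN
        intro he
        have := Nat.xor_eq_zero.mp he
        rw [Nat.shiftRight_one] at this
        omega
      rw [igrayN]
      simp only [hg, if_false]
      have hdiv : grayN k / 2 = grayN (k / 2) := by
        unfold grayN
        rw [Nat.shiftRight_one, Nat.shiftRight_one, xor_div_two, Nat.div_div_eq_div_mul]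
      rw [hdiv, ih (k / 2) (by omega)]
      unfold grayN
      rw [Nat.shiftRight_one, Nat.xor_assoc, Nat.xor_self, Nat.xor_zero]

theorem igray_lt (i s : Nat) (h : s < 2 ^ i) : igrayN s < 2 ^ i := by
  induction s using Nat.strong_induction_on with
  | _ s ih =>
    rw [igrayN]
    by_cases hs : s = 0
    · subst hs; simp [Nat.two_pow_pos]
    · simp only [hs, if_false]
      exact Nat.xor_lt_two_pow h (ih (s / 2) (by omega) (by omega))

-- ==== bridging A's port to natGrayList ====

theorem inner_loop (m : Int) (k : Nat) :
    ∀ (res tail : List Int), k ≤ res.length →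
    (PySem.List.pyRange ((k : Int) - 1) (-1) (-1)).foldl
        (fun r j => r ++ [PySem.Int.bor (PySem.List.pyGetD r j 0) m]) (res ++ tail)
      = res ++ tail ++ ((res.take k).reverse.map (fun x => PySem.Int.bor x m)) := by
  induction k with
  | zero =>
    intro res tail _
    rw [show ((0:Nat):Int) - 1 = -1 by norm_num, PySem.List.pyRange_neg_one_eq_nil le_rfl]
    simp
  | succ k ih =>
    intro res tail hk
    have hkl : k < res.length := by omega
    rw [show ((k+1:Nat):Int) - 1 = (k:Int) by push_cast; ring,
        PySem.List.pyRange_neg_one_cons (by omega : (-1:Int) < (k:Int))]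
    simp only [List.foldl_cons]
    have hget : PySem.List.pyGetD (res ++ tail) ((k:Int)) 0 = res[k] := by
      rw [PySem.List.pyGetD_natCast, List.getD_eq_getElem?_getD,
          List.getElem?_append_left hkl, List.getElem?_eq_getElem hkl]
      rfl
    rw [hget, List.append_assoc res tail _]
    rw [ih res (tail ++ [PySem.Int.bor res[k] m]) (by omega)]
    rw [show List.take (k+1) res = List.take k res ++ [res[k]] by
      rw [List.take_succ, List.getElem?_eq_getElem hkl]; rfl]
    rw [List.reverse_append, List.map_append]
    simp [List.append_assoc]

theorem outer_loop (n' : Nat) :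
    (PySem.List.pyRange 0 (n' : Int) 1).foldl (fun res i =>
      (PySem.List.pyRange ((res.length : Int) - 1) (-1) (-1)).foldl
        (fun r j => r ++ [PySem.Int.bor (PySem.List.pyGetD r j 0) ((1 : Int) <<< i.toNat)]) res)
      ([(0 : Int)])
    = (natGrayList n').map (fun k : Nat => (k : Int)) := by
  induction n' with
  | zero =>
    rw [show ((0:Nat):Int) = 0 by norm_num, PySem.List.pyRange_one_eq_nil le_rfl]
    decide
  | succ n' ih =>
    rw [show ((n'+1:Nat):Int) = (n':Int) + 1 by push_cast; ring,
        PySem.List.pyRange_one_succ_right (by positivity : (0:Int) ≤ (n':Int)),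
        List.foldl_append, ih]
    simp only [List.foldl_cons, List.foldl_nil]
    have hthis := inner_loop ((1:Int) <<< (((((n':Int)).toNat : Nat)) : Int))
      ((natGrayList n').map (fun k : Nat => (k : Int))).length
      ((natGrayList n').map (fun k : Nat => (k : Int))) [] (le_refl _)
    rw [List.append_nil] at hthis
    rw [hthis, List.take_length]
    rw [natGrayList]
    rw [List.map_append]
    congr 1
    have hsh : ((1:Int) <<< (((((n':Int)).toNat : Nat)) : Int)) = (((1 <<< n' : Nat)) : Int) := by
      rw [Int.toNat_natCast]
      exact_mod_cast Int.shiftLeft_natCast 1 n'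
    rw [hsh, ← List.map_reverse, List.map_map, List.map_map]
    apply List.map_congr_left
    intro x _
    simp only [Function.comp]
    rw [PySem.Int.bor_natCast]

theorem circularPermutation_res (n : Int) :
    (PySem.List.pyRange 0 n 1).foldl (fun res i =>
      (PySem.List.pyRange ((res.length : Int) - 1) (-1) (-1)).foldl
        (fun r j => r ++ [PySem.Int.bor (PySem.List.pyGetD r j 0) ((1 : Int) <<< i.toNat)]) res)
      ([(0 : Int)])
    = (List.range (2 ^ n.toNat)).map (fun k : Nat => ((grayN k : Nat) : Int)) := by
  by_cases hn : 0 ≤ n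
  · obtain ⟨m, rfl⟩ : ∃ m : Nat, n = (m : Int) := ⟨n.toNat, (Int.toNat_of_nonneg hn).symm⟩
    rw [outer_loop, natGrayList_eq, List.map_map]
    simp [Int.toNat_natCast]
  · rw [PySem.List.pyRange_one_eq_nil (by omega), show n.toNat = 0 by omega]
    decide

-- ==== bridging B's port ====

theorem igrayAux_eq (g : Nat) : ∀ m : Nat, igrayAux ((m : Nat) : Int) (g : Int) = (((m ^^^ igrayN g : Nat)) : Int) := by
  induction g using Nat.strong_induction_on with
  | _ g ih =>
    intro m
    by_cases hg : g = 0
    · subst hg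
      rw [igrayAux, dif_neg (by norm_num), igrayN]
      simp
    · conv_rhs => rw [igrayN]
      rw [if_neg hg]
      rw [igrayAux, dif_pos (by exact_mod_cast Nat.pos_of_ne_zero hg),
          PySem.Int.bxor_natCast, ← Int.natCast_shiftRight,
          show g >>> 1 = g / 2 from Nat.shiftRight_one g,
          ih (g / 2) (by omega) (m ^^^ g), Nat.xor_assoc]

-- B's gray list is the same range mapped through grayN
theorem alt_gray_eq (n : Int) :
    (PySem.List.pyRange 0 ((1 : Int) <<< n.toNat) 1).map
        (fun k => PySem.Int.bxor k (k >>> (1:Nat)))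
      = (List.range (2 ^ n.toNat)).map (fun k : Nat => ((grayN k : Nat) : Int)) := by
  have hshift : (1:Int) <<< n.toNat = ((2 ^ n.toNat : Nat) : Int) := by
    rw [show (1:Int) = ((1:Nat) : Int) by norm_num, ← Int.natCast_shiftLeft, Nat.one_shiftLeft]
  rw [hshift, PySem.List.pyRange_one]
  simp only [sub_zero, Int.toNat_natCast, List.map_map]
  apply List.map_congr_left
  intro t _
  simp only [Function.comp]
  rw [show (0:Int) + (t:Int) = ((t:Nat):Int) by ring, ← Int.natCast_shiftRight,
      PySem.Int.bxor_natCast]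
  simp [grayN]

-- ==== final assembly ====

theorem index_gray (N s : Nat) (hs : s < 2 ^ N) :
    PySem.List.index? ((List.range (2 ^ N)).map (fun k : Nat => ((grayN k : Nat) : Int))) ((s : Nat) : Int)
      = some (igrayN s) := by
  have hidx : igrayN s < 2 ^ N := igray_lt N s hs
  rw [PySem.List.index?_eq_some_iff]
  refine ⟨(List.range (igrayN s)).map (fun k : Nat => ((grayN k : Nat) : Int)),
          (List.range' (igrayN s + 1) (2 ^ N - igrayN s - 1)).map (fun k : Nat => ((grayN k : Nat) : Int)),
          ?_, by simp, ?_⟩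
  · rw [show (2:Nat) ^ N = igrayN s + (2 ^ N - igrayN s) by omega, List.range_add, List.map_append]
    congr 1
    rw [← List.range'_eq_map_range,
        show 2 ^ N - igrayN s = (2 ^ N - igrayN s - 1) + 1 by omega,
        List.range'_succ, List.map_cons, gray_igray s,
        show igrayN s + (2 ^ N - igrayN s - 1 + 1) - igrayN s - 1 = 2 ^ N - igrayN s - 1 by omega]
  · intro hmem
    simp only [List.mem_map, List.mem_range] at hmem
    obtain ⟨j, hj, hje⟩ := hmem
    have hgj : grayN j = s := by exact_mod_cast hje
    have : j = igrayN s := by rw [← hgj, igray_gray]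
    omega

theorem ports_agree (n start : Int) (hpre : Pre_circularPermutation n start) :
    circularPermutation n start = circularPermutation_alt n start := by
  obtain ⟨hn, h0, hlt⟩ := hpre
  obtain ⟨s, rfl⟩ : ∃ s : Nat, start = (s : Int) := ⟨start.toNat, (Int.toNat_of_nonneg h0).symm⟩
  have hshift : (1:Int) <<< n.toNat = ((2 ^ n.toNat : Nat) : Int) := by
    rw [show (1:Int) = ((1:Nat) : Int) by norm_num, ← Int.natCast_shiftLeft, Nat.one_shiftLeft]
  have hsN : s < 2 ^ n.toNat := by
    rw [hshift] at hlt
    exact_mod_cast hlt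
  -- both sides are the same list sliced at the same pivot
  simp only [circularPermutation, circularPermutation_alt, List.nil_append]
  rw [circularPermutation_res, alt_gray_eq, index_gray n.toNat s hsN,
      show (0:Int) = ((0:Nat) : Int) by norm_num, igrayAux_eq s 0, Nat.zero_xor]

-- ===== VERDICT (by name: the statement is the Claim_ definition above) =====
theorem circularPermutation_spec : Claim_equal_circularPermutation := by
  intro n start _ hpre
  unfold Spec_circularPermutation
  exact ports_agree n start hpre
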